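-- pv_equiv track=rewrite | github.com/Wulfic/Cicada3301 | Tools/attack_p20_decoded_stream_as_key.py | string_to_indices
-- ===== SOURCE A (Python) =====
-- CHAR_TO_IDX = {
--     'F': 0, 'U': 1, 'TH': 2, 'O': 3, 'R': 4, 'C': 5, 'G': 6, 'W': 7,
--     'H': 8, 'N': 9, 'I': 10, 'J': 11, 'EO': 12, 'P': 13, 'X': 14,
--     'S': 15, 'T': 16, 'B': 17, 'E': 18, 'M': 19, 'L': 20, 'NG': 21, 'OE': 22,
--     'D': 23, 'A': 24, 'AE': 25, 'Y': 26, 'IA': 27, 'EA': 28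
-- }
--
-- SINGLE_CHAR_TO_IDX = {c: i for i, c in enumerate('FUTHORCGWHNIJEOPXSTBEMLODA') if i < 26}
--
-- def string_to_indices(s):
--     """Convert a string to Gematria indices, handling digraphs."""
--     indices = []
--     i = 0
--     while i < len(s):
--         # Check for digraphs first
--         if i + 1 < len(s):
--             digraph = s[i:i+2].upper()
--             if digraph in CHAR_TO_IDX:
--                 indices.append(CHAR_TO_IDX[digraph])
--                 i += 2
--                 continue
--         # Single character
--         c = s[i].upper()
--         if c in SINGLE_CHAR_TO_IDX:
--             indices.append(SINGLE_CHAR_TO_IDX[c])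
--         elif c in CHAR_TO_IDX:
--             indices.append(CHAR_TO_IDX[c])
--         i += 1
--     return indices
-- ===== SOURCE B (Python) =====
-- CHAR_TO_IDX = {
--     'F': 0, 'U': 1, 'TH': 2, 'O': 3, 'R': 4, 'C': 5, 'G': 6, 'W': 7,
--     'H': 8, 'N': 9, 'I': 10, 'J': 11, 'EO': 12, 'P': 13, 'X': 14,
--     'S': 15, 'T': 16, 'B': 17, 'E': 18, 'M': 19, 'L': 20, 'NG': 21, 'OE': 22,
--     'D': 23, 'A': 24, 'AE': 25, 'Y': 26, 'IA': 27, 'EA': 28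
-- }
--
-- SINGLE_CHAR_TO_IDX = {c: i for i, c in enumerate('FUTHORCGWHNIJEOPXSTBEMLODA') if i < 26}
--
-- # Digraph table, and a single merged letter table (SINGLE_CHAR_TO_IDX overrides CHAR_TO_IDX).
-- DIGRAPH_TO_IDX = {k: v for k, v in CHAR_TO_IDX.items() if len(k) == 2}
-- LETTER_TO_IDX = {**{k: v for k, v in CHAR_TO_IDX.items() if len(k) == 1}, **SINGLE_CHAR_TO_IDX}
--
--
-- def string_to_indices(s):
--     """Convert a string to Gematria indices, handling digraphs."""
--     indices = []
--     pending = None  # previous character, not yet emitted: it may start a digraph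
--     for c in s.upper():
--         if pending is not None and pending + c in DIGRAPH_TO_IDX:
--             indices.append(DIGRAPH_TO_IDX[pending + c])
--             pending = None
--         else:
--             if pending is not None and pending in LETTER_TO_IDX:
--                 indices.append(LETTER_TO_IDX[pending])
--             pending = c
--     if pending is not None and pending in LETTER_TO_IDX:
--         indices.append(LETTER_TO_IDX[pending])
--     return indices
-- ===== Notes on version B (the rewrite author's own statement) =====
-- stated objective: faster
-- what changed: Replaces A's index-based while loop with per-position slicing/uppercasing and a SINGLE-then-CHAR two-dict membership cascade by a single pass over the once-uppercased string folding a one-character pending state, with a digraph table and one premerged single-letter table (one lookup per character).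
import Mathlib
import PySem

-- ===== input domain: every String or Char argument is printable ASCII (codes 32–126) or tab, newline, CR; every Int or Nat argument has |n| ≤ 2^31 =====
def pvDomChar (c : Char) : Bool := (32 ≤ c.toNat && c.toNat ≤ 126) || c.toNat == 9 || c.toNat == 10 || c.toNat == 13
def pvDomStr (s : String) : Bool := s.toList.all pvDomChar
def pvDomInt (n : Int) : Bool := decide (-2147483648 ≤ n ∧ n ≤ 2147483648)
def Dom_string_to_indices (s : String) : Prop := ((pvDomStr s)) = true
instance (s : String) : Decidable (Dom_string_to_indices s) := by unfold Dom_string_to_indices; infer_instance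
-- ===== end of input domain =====

-- B replaces A's index-and-slice while loop (two-dict membership cascade per position) by a
-- single uppercasing pass folding a one-character "pending" state over the characters, with a
-- digraph table and one merged single-letter table; same output (objective: faster by a constant factor — one lookup per character, no per-position slicing).

-- ===== PORT A =====
def CHAR_TO_IDX : PySem.Dict String Int := PySem.Dict.ofList
  [("F",0),("U",1),("TH",2),("O",3),("R",4),("C",5),("G",6),("W",7),
   ("H",8),("N",9),("I",10),("J",11),("EO",12),("P",13),("X",14),
   ("S",15),("T",16),("B",17),("E",18),("M",19),("L",20),("NG",21),("OE",22),
   ("D",23),("A",24),("AE",25),("Y",26),("IA",27),("EA",28)]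

-- SINGLE_CHAR_TO_IDX = {c: i for i, c in enumerate('FUTHORCGWHNIJEOPXSTBEMLODA') if i < 26}
def SINGLE_CHAR_TO_IDX : PySem.Dict String Int :=
  (PySem.List.enumerate "FUTHORCGWHNIJEOPXSTBEMLODA".toList).foldl
    (fun d p => if p.1 < 26 then d.insert (String.ofList [p.2]) p.1 else d) PySem.Dict.empty

-- the single-character branch of A's loop body (c = s[i].upper(); the two `in`/[] cascades)
def pvSingleA (c : Char) : List Int :=
  let cu := String.ofList (PySem.Chars.upper [c])
  match SINGLE_CHAR_TO_IDX.get? cu with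
  | some v => [v]
  | none =>
    match CHAR_TO_IDX.get? cu with
    | some v => [v]
    | none => []

-- A's `while i < len(s)` loop, as structural recursion on the remaining characters
def pvLoopA : List Char → List Int
  | [] => []
  | c :: rest =>
    match rest with
    | c2 :: rest2 =>
      -- digraph = s[i:i+2].upper(); if digraph in CHAR_TO_IDX: append, i += 2, continue
      match CHAR_TO_IDX.get? (String.ofList (PySem.Chars.upper [c, c2])) with
      | some v => v :: pvLoopA rest2
      | none => pvSingleA c ++ pvLoopA (c2 :: rest2)
    | [] => pvSingleA c ++ pvLoopA []

def string_to_indices (s : String) : List Int := pvLoopA s.toList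

-- ===== PORT B =====
-- DIGRAPH_TO_IDX = {k: v for k, v in CHAR_TO_IDX.items() if len(k) == 2}
def DIGRAPH_TO_IDX : PySem.Dict String Int :=
  CHAR_TO_IDX.items.foldl
    (fun d p => if PySem.Str.len p.1 == 2 then d.insert p.1 p.2 else d) PySem.Dict.empty

-- LETTER_TO_IDX = {**{k: v for k, v in CHAR_TO_IDX.items() if len(k) == 1}, **SINGLE_CHAR_TO_IDX}
def LETTER_TO_IDX : PySem.Dict String Int :=
  SINGLE_CHAR_TO_IDX.items.foldl (fun d p => d.insert p.1 p.2)
    (CHAR_TO_IDX.items.foldl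
      (fun d p => if PySem.Str.len p.1 == 1 then d.insert p.1 p.2 else d) PySem.Dict.empty)

-- `if pending in LETTER_TO_IDX: indices.append(LETTER_TO_IDX[pending])`
def pvEmitB (p : Char) : List Int :=
  match LETTER_TO_IDX.get? (String.ofList [p]) with
  | some v => [v]
  | none => []

-- the body of B's `for c in s.upper()` loop; state = (indices, pending)
def pvStepB (st : List Int × Option Char) (c : Char) : List Int × Option Char :=
  match st.2 with
  | some p =>
    match DIGRAPH_TO_IDX.get? (String.ofList [p, c]) with
    | some v => (st.1 ++ [v], none)
    | none => (st.1 ++ pvEmitB p, some c)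
  | none => (st.1, some c)

def string_to_indices_alt (s : String) : List Int :=
  let st := (PySem.Str.upper s).toList.foldl pvStepB ([], none)
  st.1 ++ (match st.2 with
           | some p => pvEmitB p
           | none => [])

-- ===== PRECONDITION & SPEC =====
def Spec_string_to_indices (s : String) (out : List Int) : Prop := out = string_to_indices_alt s
instance (s : String) (out : List Int) : Decidable (Spec_string_to_indices s out) := by unfold Spec_string_to_indices; infer_instance

-- ===== CLAIM (what is proved, stated in full; the proofs are below) =====
def Claim_equal_string_to_indices : Prop := ∀ (s : String), Dom_string_to_indices s → Spec_string_to_indices s (string_to_indices s)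

-- ===== LEMMAS AND PROOFS =====

-- the scan both programs perform, written over already-uppercased characters
def pvNorm : List Char → List Int
  | [] => []
  | u :: rest =>
    match rest with
    | u2 :: rest2 =>
      match DIGRAPH_TO_IDX.get? (String.ofList [u, u2]) with
      | some v => v :: pvNorm rest2
      | none => pvEmitB u ++ pvNorm (u2 :: rest2)
    | [] => pvEmitB u ++ pvNorm []

set_option maxRecDepth 8192 in
set_option maxHeartbeats 2000000 in
lemma digraph_lookup_eq (u1 u2 : Char) :
    CHAR_TO_IDX.get? (String.ofList [u1, u2]) = DIGRAPH_TO_IDX.get? (String.ofList [u1, u2]) := by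
  have hC : CHAR_TO_IDX = PySem.Dict.mk
    [("F",0),("U",1),("TH",2),("O",3),("R",4),("C",5),("G",6),("W",7),
     ("H",8),("N",9),("I",10),("J",11),("EO",12),("P",13),("X",14),
     ("S",15),("T",16),("B",17),("E",18),("M",19),("L",20),("NG",21),("OE",22),
     ("D",23),("A",24),("AE",25),("Y",26),("IA",27),("EA",28)] := by decide
  have hD : DIGRAPH_TO_IDX = PySem.Dict.mk
    [("TH",2),("EO",12),("NG",21),("OE",22),("AE",25),("IA",27),("EA",28)] := by decide
  rw [hC, hD]
  simp [PySem.Dict.get?_mk_cons, beq_iff_eq, ← String.toList_inj]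

set_option maxRecDepth 8192 in
set_option maxHeartbeats 2000000 in
lemma single_lookup_eq (u : Char) : pvSingleA u = pvEmitB (PySem.Chars.upperChar u) := by
  have hS : SINGLE_CHAR_TO_IDX = PySem.Dict.mk
    [("F",0),("U",1),("T",18),("H",9),("O",23),("R",5),("C",6),("G",7),("W",8),
     ("N",10),("I",11),("J",12),("E",20),("P",15),("X",16),("S",17),("B",19),
     ("M",21),("L",22),("D",24),("A",25)] := by decide
  have hC : CHAR_TO_IDX = PySem.Dict.mk
    [("F",0),("U",1),("TH",2),("O",3),("R",4),("C",5),("G",6),("W",7),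
     ("H",8),("N",9),("I",10),("J",11),("EO",12),("P",13),("X",14),
     ("S",15),("T",16),("B",17),("E",18),("M",19),("L",20),("NG",21),("OE",22),
     ("D",23),("A",24),("AE",25),("Y",26),("IA",27),("EA",28)] := by decide
  have hL : LETTER_TO_IDX = PySem.Dict.mk
    [("F",0),("U",1),("O",23),("R",5),("C",6),("G",7),("W",8),("H",9),("N",10),
     ("I",11),("J",12),("P",15),("X",16),("S",17),("T",18),("B",19),("E",20),
     ("M",21),("L",22),("D",24),("A",25),("Y",26)] := by decide
  unfold pvSingleA pvEmitB
  rw [hS, hC, hL]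
  have hup : PySem.Chars.upper [u] = [PySem.Chars.upperChar u] := rfl
  rw [hup]
  generalize PySem.Chars.upperChar u = w
  by_cases h0 : w = 'F'
  · subst h0; decide
  by_cases h1 : w = 'U'
  · subst h1; decide
  by_cases h2 : w = 'T'
  · subst h2; decide
  by_cases h3 : w = 'H'
  · subst h3; decide
  by_cases h4 : w = 'O'
  · subst h4; decide
  by_cases h5 : w = 'R'
  · subst h5; decide
  by_cases h6 : w = 'C'
  · subst h6; decide
  by_cases h7 : w = 'G'
  · subst h7; decide
  by_cases h8 : w = 'W'
  · subst h8; decide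
  by_cases h9 : w = 'N'
  · subst h9; decide
  by_cases h10 : w = 'I'
  · subst h10; decide
  by_cases h11 : w = 'J'
  · subst h11; decide
  by_cases h12 : w = 'E'
  · subst h12; decide
  by_cases h13 : w = 'P'
  · subst h13; decide
  by_cases h14 : w = 'X'
  · subst h14; decide
  by_cases h15 : w = 'S'
  · subst h15; decide
  by_cases h16 : w = 'B'
  · subst h16; decide
  by_cases h17 : w = 'M'
  · subst h17; decide
  by_cases h18 : w = 'L'
  · subst h18; decide
  by_cases h19 : w = 'D'
  · subst h19; decide
  by_cases h20 : w = 'A'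
  · subst h20; decide
  by_cases h21 : w = 'Y'
  · subst h21; decide
  simp [PySem.Dict.get?, beq_iff_eq, ← String.toList_inj, Ne.symm h0, Ne.symm h1, Ne.symm h2, Ne.symm h3, Ne.symm h4, Ne.symm h5, Ne.symm h6, Ne.symm h7, Ne.symm h8, Ne.symm h9, Ne.symm h10, Ne.symm h11, Ne.symm h12, Ne.symm h13, Ne.symm h14, Ne.symm h15, Ne.symm h16, Ne.symm h17, Ne.symm h18, Ne.symm h19, Ne.symm h20, Ne.symm h21]

theorem loopA_eq_norm : ∀ l : List Char, pvLoopA l = pvNorm (l.map PySem.Chars.upperChar)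
  | [] => rfl
  | [c] => by simp [pvLoopA, pvNorm, single_lookup_eq]
  | c :: c2 :: r => by
    have hd : PySem.Chars.upper [c, c2] = [PySem.Chars.upperChar c, PySem.Chars.upperChar c2] := rfl
    simp only [pvLoopA, List.map, pvNorm, hd, digraph_lookup_eq]
    cases hD : DIGRAPH_TO_IDX.get? (String.ofList [PySem.Chars.upperChar c, PySem.Chars.upperChar c2]) with
    | some v => simp [loopA_eq_norm r]
    | none => simp [single_lookup_eq, loopA_eq_norm (c2 :: r)]

def pvFlush (st : List Int × Option Char) : List Int :=
  st.1 ++ (match st.2 with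
           | some p => pvEmitB p
           | none => [])

theorem foldB_norm : ∀ U : List Char,
    (∀ acc pch, pvFlush (U.foldl pvStepB (acc, some pch)) = acc ++ pvNorm (pch :: U)) ∧
    (∀ acc, pvFlush (U.foldl pvStepB (acc, none)) = acc ++ pvNorm U)
  | [] => by
    constructor
    · intro acc pch; simp [pvFlush, pvNorm]
    · intro acc; simp [pvFlush, pvNorm]
  | u :: U' => by
    obtain ⟨ih1, ih2⟩ := foldB_norm U'
    constructor
    · intro acc pch
      simp only [List.foldl_cons, pvStepB]
      cases hD : DIGRAPH_TO_IDX.get? (String.ofList [pch, u]) with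
      | some v => rw [ih2]; simp [pvNorm, hD]
      | none => rw [ih1]; simp [pvNorm, hD]
    · intro acc
      simp only [List.foldl_cons, pvStepB]
      exact ih1 acc u

-- ===== VERDICT (by name: the statement is the Claim_ definition above) =====
theorem string_to_indices_spec : Claim_equal_string_to_indices := by
  intro s _
  unfold Spec_string_to_indices string_to_indices string_to_indices_alt
  rw [loopA_eq_norm]
  have h := (foldB_norm (PySem.Str.upper s).toList).2 []
  unfold pvFlush at h
  rw [h]
  simp [PySem.Str.upper, PySem.Chars.upper]
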